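-- pv_equiv track=rewrite | github.com/akash-bintel/autotest_agent | agents/test_generators.py | _extract_import_block
-- ===== SOURCE A (Python) =====
-- def _extract_import_block(lines: list[str]) -> tuple[int, int]:
--     start = None
--     end = None
--     for i, line in enumerate(lines):
--         if line.startswith("import "):
--             if start is None:
--                 start = i
--             end = i
--         elif start is not None:
--             break
--     if start is None:
--         return (0, -1)
--     return (start, end)
-- ===== SOURCE B (Python) =====
-- def _extract_import_block(lines: list[str]) -> tuple[int, int]:
--     idxs = [i for i, line in enumerate(lines) if line.startswith("import ")]
--     if not idxs:
--         return (0, -1)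
--     start = idxs[0]
--     end = start
--     for j in idxs[1:]:
--         if j != end + 1:
--             break
--         end = j
--     return (start, end)
-- ===== Notes on version B (the rewrite author's own statement) =====
-- stated objective: alternative
-- what changed: B first collects the list of all import-line indices, then walks that index list from its head extending the end while indices stay consecutive, instead of A's single stateful flag-driven scan with a break.
import Mathlib
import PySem

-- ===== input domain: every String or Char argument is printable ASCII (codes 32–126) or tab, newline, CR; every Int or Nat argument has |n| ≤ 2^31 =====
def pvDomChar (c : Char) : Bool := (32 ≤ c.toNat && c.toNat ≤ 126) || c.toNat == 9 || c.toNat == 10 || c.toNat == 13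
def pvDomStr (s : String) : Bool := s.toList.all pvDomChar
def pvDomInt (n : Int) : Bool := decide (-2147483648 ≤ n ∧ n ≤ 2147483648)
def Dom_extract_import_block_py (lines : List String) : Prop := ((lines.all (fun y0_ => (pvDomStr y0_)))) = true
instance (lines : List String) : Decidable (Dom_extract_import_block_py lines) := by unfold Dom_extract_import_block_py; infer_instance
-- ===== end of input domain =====

-- B replaces A's flag-driven scan-with-break by first collecting all import-line
-- indices and then walking that index list while indices stay consecutive
-- (objective: alternative decomposition, same cost).

-- ===== PORT A =====
-- the enumerate loop of A: state = none (start is None) or some (start, end); break = early return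
def pvLoopA : List String → Int → Option (Int × Int) → Int × Int
  | [], _, st => (match st with | some (s, e) => (s, e) | none => (0, -1))
  | l :: rest, i, st =>
    if PySem.Str.startswith l "import " then
      pvLoopA rest (i + 1) (some (match st with | none => (i, i) | some (s, _) => (s, i)))
    else
      match st with
      | some (s, e) => (s, e)      -- break, then return (start, end)
      | none => pvLoopA rest (i + 1) none

def extract_import_block_py (lines : List String) : Int × Int :=
  pvLoopA lines 0 none

-- ===== PORT B =====
-- the for-loop of B over idxs[1:], with break
def pvWalkB : List Int → Int → Int
  | [], e => e
  | j :: rest, e => if j ≠ e + 1 then e else pvWalkB rest j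

def extract_import_block_py_alt (lines : List String) : Int × Int :=
  let idxs := ((PySem.List.enumerate lines 0).filter
      (fun p => PySem.Str.startswith p.2 "import ")).map (fun p => p.1)
  match idxs with
  | [] => (0, -1)
  | s :: rest => (s, pvWalkB rest s)

-- ===== PRECONDITION & SPEC =====
def Spec_extract_import_block_py (lines : List String) (out : Int × Int) : Prop := out = extract_import_block_py_alt lines
instance (lines : List String) (out : Int × Int) : Decidable (Spec_extract_import_block_py lines out) := by unfold Spec_extract_import_block_py; infer_instance

-- ===== CLAIM (what is proved, stated in full; the proofs are below) =====
def Claim_equal_extract_import_block_py : Prop := ∀ (lines : List String), Dom_extract_import_block_py lines → Spec_extract_import_block_py lines (extract_import_block_py lines)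

-- ===== LEMMAS AND PROOFS =====

-- the import-line indices of `lines`, positions counted from `i`
def pvIdxsFrom : List String → Int → List Int
  | [], _ => []
  | l :: rest, i =>
    if PySem.Str.startswith l "import " then i :: pvIdxsFrom rest (i + 1)
    else pvIdxsFrom rest (i + 1)

theorem pvIdxs_eq (lines : List String) (i : Int) :
    ((PySem.List.enumerate lines i).filter
      (fun p => PySem.Str.startswith p.2 "import ")).map (fun p => p.1) = pvIdxsFrom lines i := by
  induction lines generalizing i with
  | nil => simp [PySem.List.enumerate_nil, pvIdxsFrom]
  | cons l rest ih =>
    simp only [PySem.List.enumerate_cons, List.filter_cons, pvIdxsFrom]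
    split <;> simp_all [ih]

theorem pvIdxsFrom_lb (lines : List String) (i j : Int) (hj : j ∈ pvIdxsFrom lines i) : i ≤ j := by
  induction lines generalizing i with
  | nil => simp [pvIdxsFrom] at hj
  | cons l rest ih =>
    simp only [pvIdxsFrom] at hj
    split at hj
    · rcases List.mem_cons.mp hj with h | h
      · omega
      · have := ih (i + 1) h; omega
    · have := ih (i + 1) hj; omega

theorem pvWalkB_stuck (L : List Int) (e : Int) (h : ∀ j ∈ L, j ≠ e + 1) :
    pvWalkB L e = e := by
  cases L with
  | nil => simp [pvWalkB]
  | cons j rest =>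
    have := h j (List.mem_cons_self)
    simp only [pvWalkB]
    rw [if_pos this]

theorem pvLoopA_started (lines : List String) (i s e : Int) (he : e + 1 = i) :
    pvLoopA lines i (some (s, e)) = (s, pvWalkB (pvIdxsFrom lines i) e) := by
  induction lines generalizing i e with
  | nil => simp [pvLoopA, pvIdxsFrom, pvWalkB]
  | cons l rest ih =>
    simp only [pvLoopA, pvIdxsFrom]
    by_cases h : PySem.Str.startswith l "import " = true
    · simp only [h, if_pos]
      rw [ih (i + 1) i rfl]
      simp only [pvWalkB]
      rw [if_neg (by omega)]
    · simp only [h]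
      rw [if_neg (by simp [h]), if_neg (by simp [h])]
      rw [pvWalkB_stuck _ e (fun j hj => by have := pvIdxsFrom_lb rest (i + 1) j hj; omega)]

theorem pvLoopA_none (lines : List String) (i : Int) :
    pvLoopA lines i none =
      (match pvIdxsFrom lines i with
       | [] => ((0 : Int), (-1 : Int))
       | s :: rest => (s, pvWalkB rest s)) := by
  induction lines generalizing i with
  | nil => simp [pvLoopA, pvIdxsFrom]
  | cons l rest ih =>
    simp only [pvLoopA, pvIdxsFrom]
    by_cases h : PySem.Str.startswith l "import " = true
    · simp only [h, if_pos]
      rw [pvLoopA_started rest (i + 1) i i rfl]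
    · simp only [h]
      rw [if_neg (by simp [h])]
      exact ih (i + 1)

-- ===== VERDICT (by name: the statement is the Claim_ definition above) =====
theorem extract_import_block_py_spec : Claim_equal_extract_import_block_py := by
  intro lines _
  unfold Spec_extract_import_block_py extract_import_block_py extract_import_block_py_alt
  rw [pvLoopA_none lines 0, pvIdxs_eq lines 0]
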